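-- pv_equiv track=rewrite | github.com/Right5963/metacard- | analyze_specific_tags.py | create_yaml_from_categorized
-- ===== SOURCE A (Python) =====
-- def create_yaml_from_categorized(categorized_tags):
--     """カテゴリ別タグからYAML構造を作成"""
--     yaml_structure = {}
--
--     # character_mainを特別処理
--     if "character_main" in categorized_tags:
--         yaml_structure["character_main"] = categorized_tags["character_main"]
--
--     # その他のカテゴリ
--     for category, tags in categorized_tags.items():
--         if category != "character_main":
--             yaml_structure[category] = tags
--
--     return yaml_structure
-- ===== SOURCE B (Python) =====
-- def create_yaml_from_categorized(categorized_tags):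
--     """カテゴリ別タグからYAML構造を作成"""
--     return dict(sorted(categorized_tags.items(),
--                        key=lambda kv: kv[0] != "character_main"))
-- ===== Notes on version B (the rewrite author's own statement) =====
-- stated objective: idiomatic
-- what changed: Replaces the explicit special-case insertion of 'character_main' plus a second filtered loop by a single stable sort on a boolean priority key that moves 'character_main' to the front and preserves the order of everything else.
import Mathlib
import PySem

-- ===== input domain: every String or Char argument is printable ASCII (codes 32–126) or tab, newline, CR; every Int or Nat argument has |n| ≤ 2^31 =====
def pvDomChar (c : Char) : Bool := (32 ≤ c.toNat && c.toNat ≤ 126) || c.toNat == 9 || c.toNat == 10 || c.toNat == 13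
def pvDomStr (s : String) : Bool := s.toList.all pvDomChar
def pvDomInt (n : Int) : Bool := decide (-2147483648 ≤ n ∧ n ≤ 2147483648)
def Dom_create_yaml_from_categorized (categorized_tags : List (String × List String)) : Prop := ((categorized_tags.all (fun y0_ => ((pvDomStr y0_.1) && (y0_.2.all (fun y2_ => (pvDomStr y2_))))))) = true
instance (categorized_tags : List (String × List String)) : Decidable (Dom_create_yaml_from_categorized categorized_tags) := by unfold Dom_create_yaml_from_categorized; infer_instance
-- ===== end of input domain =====

-- B reorders the dict in one shot: a stable sort on a boolean priority key pushes
-- 'character_main' to the front, replacing A's special-case insert plus filtered loop (idiomatic).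


-- ===== PORT A =====
def create_yaml_from_categorized (categorized_tags : List (String × List String)) : List (String × List String) :=
  let d : PySem.Dict String (List String) := PySem.Dict.mk categorized_tags
  let yaml0 : PySem.Dict String (List String) := PySem.Dict.empty
  -- d["character_main"] is guarded by the contains check, so getD [] is exact here
  let yaml1 := if d.contains "character_main" then
      yaml0.insert "character_main" ((d.get? "character_main").getD [])
    else yaml0
  let yaml2 := d.items.foldl
    (fun acc p => if p.1 ≠ "character_main" then acc.insert p.1 p.2 else acc) yaml1
  yaml2.items

-- ===== PORT B =====
def create_yaml_from_categorized_alt (categorized_tags : List (String × List String)) : List (String × List String) :=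
  (PySem.Dict.ofList
    (PySem.List.sorted categorized_tags (fun kv => kv.1 != "character_main") false)).items

-- ===== PRECONDITION & SPEC =====
-- The assoc list stands for a Python dict, whose keys are unique; duplicate keys
-- correspond to no Python input, so Pre_ requires the keys to be distinct.
def Pre_create_yaml_from_categorized (categorized_tags : List (String × List String)) : Prop :=
  (categorized_tags.map Prod.fst).Nodup
instance (categorized_tags : List (String × List String)) : Decidable (Pre_create_yaml_from_categorized categorized_tags) := by unfold Pre_create_yaml_from_categorized; infer_instance
def pvWitness_create_yaml_from_categorized : (List (String × List String)) :=
  [("art", ["oil"]), ("character_main", ["miku"]), ("scene", ["sky", "sea"])]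
def Spec_create_yaml_from_categorized (categorized_tags : List (String × List String)) (out : List (String × List String)) : Prop := out = create_yaml_from_categorized_alt categorized_tags
instance (categorized_tags : List (String × List String)) (out : List (String × List String)) : Decidable (Spec_create_yaml_from_categorized categorized_tags out) := by unfold Spec_create_yaml_from_categorized; infer_instance

-- ===== CLAIM (what is proved, stated in full; the proofs are below) =====
def Claim_equal_create_yaml_from_categorized : Prop := ∀ (categorized_tags : List (String × List String)), Dom_create_yaml_from_categorized categorized_tags → Pre_create_yaml_from_categorized categorized_tags → Spec_create_yaml_from_categorized categorized_tags (create_yaml_from_categorized categorized_tags)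

-- ===== LEMMAS AND PROOFS =====

-- Inserting a false-key element into a (false-keys ++ true-keys) list lands right between them.
theorem insertBy_partition_false {α : Type} (p : α → Bool) (x : α) (F T : List α)
    (hx : p x = false) (hF : ∀ a ∈ F, p a = false) (hT : ∀ a ∈ T, p a = true) :
    PySem.List.insertBy (fun a b => decide (p a < p b)) x (F ++ T) = F ++ x :: T := by
  induction F with
  | nil =>
    cases T with
    | nil => simp [PySem.List.insertBy]
    | cons y ys =>
      have hy : p y = true := hT y (by simp)
      simp [PySem.List.insertBy, hx, hy]
  | cons a F ih =>
    have ha : p a = false := hF a (by simp)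
    have : (decide (p x < p a)) = false := by simp [hx, ha]
    simp only [List.cons_append, PySem.List.insertBy, this, Bool.false_eq_true, if_false]
    rw [ih (fun b hb => hF b (by simp [hb]))]

-- Inserting a true-key element appends it at the end.
theorem insertBy_partition_true {α : Type} (p : α → Bool) (x : α) (l : List α)
    (hx : p x = true) :
    PySem.List.insertBy (fun a b => decide (p a < p b)) x l = l ++ [x] := by
  apply PySem.List.insertBy_of_forall_not_before
  intro y _
  cases hy : p y <;> simp [hx]

-- Stable insertion sort on a boolean key is the partition: false-keys first, then true-keys,
-- each side in original order.
theorem foldl_insertBy_bool {α : Type} (p : α → Bool) (xs F T : List α)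
    (hF : ∀ a ∈ F, p a = false) (hT : ∀ a ∈ T, p a = true) :
    xs.foldl (fun acc x => PySem.List.insertBy (fun a b => decide (p a < p b)) x acc) (F ++ T)
      = (F ++ xs.filter (fun x => !p x)) ++ (T ++ xs.filter p) := by
  induction xs generalizing F T with
  | nil => simp
  | cons x xs ih =>
    cases hx : p x with
    | false =>
      simp only [List.foldl_cons]
      rw [insertBy_partition_false p x F T hx hF hT]
      have := ih (F ++ [x]) T
        (by intro a ha; rcases List.mem_append.mp ha with h | h
            · exact hF a h
            · simp at h; simpa [h] using hx) hT
      simpa [List.filter_cons, hx] using this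
    | true =>
      simp only [List.foldl_cons]
      rw [insertBy_partition_true p x (F ++ T) hx, List.append_assoc]
      have := ih F (T ++ [x]) hF
        (by intro a ha; rcases List.mem_append.mp ha with h | h
            · exact hT a h
            · simp at h; simpa [h] using hx)
      simpa [List.filter_cons, hx] using this

theorem sorted_bool_eq_partition {α : Type} (p : α → Bool) (xs : List α) :
    PySem.List.sorted xs (fun x => p x) false
      = xs.filter (fun x => !p x) ++ xs.filter p := by
  have := foldl_insertBy_bool p xs [] [] (by simp) (by simp)
  simpa [PySem.List.sorted_eq_foldl_insertBy] using this

-- ofList of a list with distinct keys returns that list as items.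
theorem items_ofList_nodup {κ ν : Type} [BEq κ] [LawfulBEq κ] (l : List (κ × ν))
    (h : (l.map Prod.fst).Nodup) :
    (PySem.Dict.ofList l).items = l := by
  have := PySem.Dict.items_foldl_insert_fresh l Prod.fst Prod.snd PySem.Dict.empty
    (by intro a _; simp [PySem.Dict.contains_empty]) h
  simpa [PySem.Dict.ofList, PySem.Dict.update] using this

-- With distinct keys, the entries whose key equals k are exactly the first match.
theorem filter_eq_key_of_nodup {ν : Type} (l : List (String × ν)) (k : String)
    (h : (l.map Prod.fst).Nodup) :
    l.filter (fun p => p.1 == k)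
      = ((l.find? (fun p => p.1 == k)).map (fun q => [q])).getD [] := by
  induction l with
  | nil => simp
  | cons a l ih =>
    simp only [List.map_cons, List.nodup_cons] at h
    cases ha : (a.1 == k) with
    | true =>
      have hak : a.1 = k := by simpa using ha
      have : l.filter (fun p => p.1 == k) = [] := by
        apply List.filter_eq_nil_iff.mpr
        intro q hq
        have : q.1 ≠ a.1 := fun he => h.1 (he ▸ List.mem_map_of_mem hq)
        simp [hak ▸ this]
      simp [ha, this]
    | false =>
      simp [ha, ih h.2]

-- ===== VERDICT (by name: the statement is the Claim_ definition above) =====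

theorem create_yaml_from_categorized_spec : Claim_equal_create_yaml_from_categorized := by
  intro ct _ hpre
  show create_yaml_from_categorized ct = create_yaml_from_categorized_alt ct
  have hpre' : (ct.map Prod.fst).Nodup := hpre
  -- B reduces to the stable boolean partition
  have hperm : ((PySem.List.sorted ct (fun kv => kv.1 != "character_main") false).map Prod.fst).Nodup := by
    exact ((PySem.List.sorted_perm ct _ false).map Prod.fst).nodup_iff.mpr hpre'
  have hB : create_yaml_from_categorized_alt ct
      = ct.filter (fun x => !(x.1 != "character_main")) ++ ct.filter (fun x => x.1 != "character_main") := by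
    unfold create_yaml_from_categorized_alt
    rw [items_ofList_nodup _ hperm]
    exact sorted_bool_eq_partition (fun kv => kv.1 != "character_main") ct
  -- A's second loop is a fold of inserts over the filtered list
  unfold create_yaml_from_categorized
  simp only []
  rw [hB]
  have hfold : ∀ (y : PySem.Dict String (List String)),
      (PySem.Dict.mk ct).items.foldl
        (fun acc p => if p.1 ≠ "character_main" then acc.insert p.1 p.2 else acc) y
      = (ct.filter (fun x => x.1 != "character_main")).foldl
          (fun acc p => acc.insert p.1 p.2) y := by
    intro y
    rw [List.foldl_filter]
    simp
  cases hc : (PySem.Dict.mk ct).contains "character_main" with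
  | false =>
    simp only [Bool.false_eq_true, if_false]
    rw [hfold]
    have hnone : ct.filter (fun x => !(x.1 != "character_main")) = [] := by
      apply List.filter_eq_nil_iff.mpr
      intro q hq h
      simp [PySem.Dict.contains] at hc
      have hq1 : q.1 = "character_main" := by simpa using h
      exact hc q.1 q.2 (by simpa using hq) hq1
    rw [hnone, List.nil_append]
    have := PySem.Dict.items_foldl_insert_fresh (ct.filter (fun x => x.1 != "character_main"))
      Prod.fst Prod.snd PySem.Dict.empty
      (by intro a _; simp [PySem.Dict.contains_empty])
      (hpre'.sublist (List.filter_sublist.map Prod.fst))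
    simpa using this
  | true =>
    simp only [if_true]
    rw [hfold]
    -- the guarded lookup: find? gives the unique character_main entry
    obtain ⟨q0, hq0⟩ : ∃ q0, ct.find? (fun p => p.1 == "character_main") = some q0 := by
      have : ct.any (fun p => p.1 == "character_main") = true := by
        simpa [PySem.Dict.contains] using hc
      obtain ⟨x, hx, hpx⟩ := List.any_eq_true.mp this
      have h : (ct.find? (fun p => p.1 == "character_main")).isSome :=
        List.find?_isSome.mpr ⟨x, hx, hpx⟩
      exact Option.isSome_iff_exists.mp h
    have hq0k : q0.1 = "character_main" := by
      have := List.find?_some hq0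
      simpa using this
    have hget : (PySem.Dict.mk ct).get? "character_main" = some q0.2 := by
      simp [PySem.Dict.get?, hq0]
    have heq : ct.filter (fun x => !(x.1 != "character_main")) = [q0] := by
      have h1 : ct.filter (fun p => p.1 == "character_main") = [q0] := by
        rw [filter_eq_key_of_nodup ct "character_main" hpre', hq0]
        rfl
      calc ct.filter (fun x => !(x.1 != "character_main"))
          = ct.filter (fun p => p.1 == "character_main") := by
            apply List.filter_congr; intro a _; simp [bne]
        _ = [q0] := h1
    rw [heq, hget]
    simp only [Option.getD_some]
    have hitems1 : (PySem.Dict.empty.insert "character_main" q0.2 :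
        PySem.Dict String (List String)).items = [("character_main", q0.2)] := by
      rw [PySem.Dict.items_insert_of_not_contains]
      · simp [PySem.Dict.empty]
      · simp [PySem.Dict.contains_empty]
    have := PySem.Dict.items_foldl_insert_fresh (ct.filter (fun x => x.1 != "character_main"))
      Prod.fst Prod.snd (PySem.Dict.empty.insert "character_main" q0.2)
      (by intro a ha
          have hane : (a.1 != "character_main") = true := (List.mem_filter.mp ha).2
          have h1 : (a.1 == "character_main") = false := by simpa using hane
          simp [PySem.Dict.contains_insert, PySem.Dict.contains_empty, h1])
      (hpre'.sublist (List.filter_sublist.map Prod.fst))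
    rw [this, hitems1]
    have hq0e : ("character_main", q0.2) = q0 := by rw [← hq0k]
    simp [hq0e]
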